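-- pv_equiv track=rewrite | github.com/anisul770/computer_science | LAB 07/sum_with_alternating_sign/main.py | integer_list
-- ===== SOURCE A (Python) =====
-- def integer_list(line):
--     list_ = []
--     count = 0
--     for i in range(len(line)):
--         if not line[i].isdigit():
--             list_.append(line[i-count:i])
--             count = 0
--         elif line[i].isdigit():
--             count += 1
--             if i == len(line)-1:
--                 list_.append(line[i-count+1:i+count])
--
--     return list_
-- ===== SOURCE B (Python) =====
-- import re
--
--
-- def integer_list(line):
--     result = re.findall(r'(\d*)\D', line)
--     if line and line[-1].isdigit():
--         result.append(re.search(r'\d*$', line).group())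
--     return result
-- ===== Notes on version B (the rewrite author's own statement) =====
-- stated objective: idiomatic
-- what changed: B replaces A's manual index/run-counter/slice-arithmetic scan by a regex pattern decomposition: re.findall(r'(\d*)\D') collects the digit run before each non-digit and a final re.search(r'\d*$') appends the trailing run when the last character is a digit.
import Mathlib
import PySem

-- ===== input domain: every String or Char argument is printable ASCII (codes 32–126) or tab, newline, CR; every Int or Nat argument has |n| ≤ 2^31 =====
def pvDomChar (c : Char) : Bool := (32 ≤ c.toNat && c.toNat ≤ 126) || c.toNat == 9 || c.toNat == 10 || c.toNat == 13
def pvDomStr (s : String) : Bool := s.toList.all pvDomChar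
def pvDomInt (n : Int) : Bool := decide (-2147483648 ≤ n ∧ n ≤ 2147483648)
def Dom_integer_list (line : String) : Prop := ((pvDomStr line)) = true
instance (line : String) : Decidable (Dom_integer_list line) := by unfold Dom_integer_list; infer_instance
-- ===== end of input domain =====

-- B replaces A's index/counter/slice scan by a regex-style pattern decomposition
-- (digit run before each non-digit, plus the trailing digit run); objective: idiomatic.

-- ===== PORT A =====
-- pvStepA is A's loop body, verbatim: list_/count state, slice appends.
def pvStepA (line : String) (n : Int) (st : List String × Int) (i : Int) : List String × Int :=
  match PySem.Str.pyGet? line i with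
  | none => st  -- unreachable: i ranges over range(len(line))
  | some c =>
    if ¬ PySem.Str.isdigit c then
      (st.1 ++ [PySem.Str.slice line (some (i - st.2)) (some i)], 0)
    else if PySem.Str.isdigit c then
      if i == n - 1 then
        (st.1 ++ [PySem.Str.slice line (some (i - (st.2 + 1) + 1)) (some (i + (st.2 + 1)))], st.2 + 1)
      else (st.1, st.2 + 1)
    else st

def integer_list (line : String) : List String :=
  ((PySem.List.pyRange 0 (PySem.Str.len line)).foldl
      (pvStepA line (PySem.Str.len line)) (([], 0) : List String × Int)).1

-- ===== PORT B =====
-- hand port of re.findall(r'(\d*)\D', line): the digit run pending before each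
-- non-digit character (exact on the ASCII domain, where \d = str.isdigit).
def pvFindGroups : List Char → List Char → List (List Char)
  | _, [] => []
  | run, c :: rest =>
    if PySem.Chars.isdigit c then pvFindGroups (run ++ [c]) rest
    else run :: pvFindGroups [] rest

-- hand port of re.search(r'\d*$', line).group(): the maximal digit suffix (exact on ASCII).
def pvDigitSuffix (cs : List Char) : List Char :=
  (cs.reverse.takeWhile PySem.Chars.isdigit).reverse

def integer_list_alt (line : String) : List String :=
  let cs := line.toList
  let result := (pvFindGroups [] cs).map String.ofList
  -- `if line and line[-1].isdigit()`
  match PySem.List.pyGet? cs (-1) with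
  | some c =>
    if PySem.Chars.isdigit c then result ++ [String.ofList (pvDigitSuffix cs)] else result
  | none => result

-- ===== PRECONDITION & SPEC =====
def Spec_integer_list (line : String) (out : List String) : Prop := out = integer_list_alt line
instance (line : String) (out : List String) : Decidable (Spec_integer_list line out) := by unfold Spec_integer_list; infer_instance

-- ===== CLAIM (what is proved, stated in full; the proofs are below) =====
def Claim_equal_integer_list : Prop := ∀ (line : String), Dom_integer_list line → Spec_integer_list line (integer_list line)

-- ===== LEMMAS AND PROOFS =====

-- the digit run pending after processing the input, starting from a pending run
def pvPend : List Char → List Char → List Char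
  | run, [] => run
  | run, c :: rest => if PySem.Chars.isdigit c then pvPend (run ++ [c]) rest else pvPend [] rest

lemma pvFindGroups_concat (c : Char) : ∀ (xs run : List Char),
    pvFindGroups run (xs ++ [c]) =
      if PySem.Chars.isdigit c then pvFindGroups run xs
      else pvFindGroups run xs ++ [pvPend run xs] := by
  intro xs
  induction xs with
  | nil =>
    intro run
    by_cases h : PySem.Chars.isdigit c <;> simp [pvFindGroups, pvPend, h]
  | cons a rest ih =>
    intro run
    by_cases h : PySem.Chars.isdigit a
    · simp [pvFindGroups, pvPend, h, ih]
    · simp [pvFindGroups, pvPend, h, ih]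
      split_ifs <;> simp

lemma pvPend_concat (c : Char) : ∀ (xs run : List Char),
    pvPend run (xs ++ [c]) =
      if PySem.Chars.isdigit c then pvPend run xs ++ [c] else [] := by
  intro xs
  induction xs with
  | nil =>
    intro run
    by_cases h : PySem.Chars.isdigit c <;> simp [pvPend, h]
  | cons a rest ih =>
    intro run
    by_cases h : PySem.Chars.isdigit a <;> simp [pvPend, h, ih]

lemma pvPend_decomp (xs : List Char) : ∃ ys, xs = ys ++ pvPend [] xs := by
  induction xs using List.reverseRecOn with
  | nil => exact ⟨[], rfl⟩
  | append_singleton xs c ih =>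
    rw [pvPend_concat]
    split_ifs with h
    · obtain ⟨ys, hy⟩ := ih
      exact ⟨ys, by rw [← List.append_assoc, ← hy]⟩
    · exact ⟨xs ++ [c], by simp⟩

lemma pvPend_eq_suffix : ∀ (xs run : List Char), (∀ x ∈ run, PySem.Chars.isdigit x) →
    pvPend run xs = pvDigitSuffix (run ++ xs) := by
  intro xs
  induction xs with
  | nil =>
    intro run h
    simp only [pvPend, pvDigitSuffix, List.append_nil]
    rw [List.takeWhile_eq_self_iff.mpr (fun x hx => h x (List.mem_reverse.mp hx))]
    simp
  | cons a rest ih =>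
    intro run h
    have hrun : ∀ x ∈ run ++ [a], PySem.Chars.isdigit a = true → PySem.Chars.isdigit x = true := by
      intro x hx ha
      rcases List.mem_append.mp hx with h1 | h1
      · exact h x h1
      · rw [List.mem_singleton.mp h1]; exact ha
    by_cases ha : PySem.Chars.isdigit a
    · rw [show pvPend run (a :: rest) = pvPend (run ++ [a]) rest from by simp [pvPend, ha]]
      rw [ih (run ++ [a]) (fun x hx => hrun x hx ha)]
      congr 1
      simp
    · rw [show pvPend run (a :: rest) = pvPend [] rest from by simp [pvPend, ha]]
      rw [ih [] (by simp)]
      simp only [List.nil_append]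
      unfold pvDigitSuffix
      have hrev : (run ++ a :: rest).reverse = rest.reverse ++ (a :: run.reverse) := by simp
      rw [hrev, List.takeWhile_append]
      split_ifs with hlen
      · have hfull : rest.reverse.takeWhile PySem.Chars.isdigit = rest.reverse :=
          (List.takeWhile_prefix _).eq_of_length hlen
        rw [List.takeWhile_cons_of_neg (by simpa using ha), hfull]
        simp
      · simp

lemma pvIsdigit_eq : PySem.Str.isdigit = PySem.Chars.isdigit := rfl

lemma pvGet_line (line : String) (m : Nat) (hm : m < line.toList.length) :
    PySem.Str.pyGet? line (m : Int) = some (line.toList[m]'hm) := by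
  rw [PySem.Str.pyGet?_natCast, List.getElem?_eq_getElem hm]

lemma pvTake_concat (line : String) (m : Nat) (hm : m < line.toList.length) :
    line.toList.take (m + 1) = line.toList.take m ++ [line.toList[m]'hm] := by
  rw [List.take_add_one, List.getElem?_eq_getElem hm]
  rfl

-- the non-digit slice: line[i-count:i] is exactly the pending digit run
lemma pvSliceA (line : String) (m : Nat) (hm : m ≤ line.toList.length) :
    PySem.Str.slice line (some ((m : Int) - ((pvPend [] (line.toList.take m)).length : Int)))
        (some (m : Int))
      = String.ofList (pvPend [] (line.toList.take m)) := by
  obtain ⟨ys, hys⟩ := pvPend_decomp (line.toList.take m)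
  set pend := pvPend [] (line.toList.take m) with hp
  have hlen : ys.length + pend.length = m := by
    have := congrArg List.length hys
    simp only [List.length_take, List.length_append] at this
    omega
  have hk : pend.length ≤ m := by omega
  have hcast : ((m - pend.length : Nat) : Int) = (m : Int) - (pend.length : Int) := by omega
  rw [← hcast]
  have h1 : (PySem.Str.slice line (some ((m - pend.length : Nat) : Int)) (some (m : Int))).toList
      = pend := by
    rw [PySem.Str.toList_slice, PySem.Chars.slice_eq_listSlice, PySem.List.slice_natCast]
    have hys' : ys.length = m - pend.length := by omega
    conv_lhs => rw [show line.toList = ys ++ (pend ++ line.toList.drop m) from by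
      rw [← List.append_assoc, ← hys, List.take_append_drop]]
    rw [List.drop_left' hys', show m - (m - pend.length) = pend.length from by omega,
      List.take_left' rfl]
  conv_rhs => rw [← h1]
  rw [String.ofList_toList]

-- the final-digit slice: line[i-count+1:i+count] at i = len-1 is the full digit suffix
lemma pvSliceB (line : String) (m : Nat) (c : Char) (hm : line.toList.length = m + 1)
    (hc : line.toList = line.toList.take m ++ [c]) (hd : PySem.Chars.isdigit c = true) :
    PySem.Str.slice line
        (some ((m : Int) - (((pvPend [] (line.toList.take m)).length : Int) + 1) + 1))
        (some ((m : Int) + (((pvPend [] (line.toList.take m)).length : Int) + 1)))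
      = String.ofList (pvPend [] line.toList) := by
  obtain ⟨ys, hys⟩ := pvPend_decomp (line.toList.take m)
  set pend := pvPend [] (line.toList.take m) with hp
  have hlen : ys.length + pend.length = m := by
    have := congrArg List.length hys
    simp only [List.length_take, List.length_append] at this
    omega
  have hk : pend.length ≤ m := by omega
  have hfull : pvPend [] line.toList = pend ++ [c] := by
    rw [hc, pvPend_concat, if_pos hd]
  have e1 : ((m - pend.length : Nat) : Int)
      = (m : Int) - (((pend.length : Nat) : Int) + 1) + 1 := by omega
  have e2 : ((m + pend.length + 1 : Nat) : Int)
      = (m : Int) + (((pend.length : Nat) : Int) + 1) := by omega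
  rw [← e1, ← e2]
  have h1 : (PySem.Str.slice line (some ((m - pend.length : Nat) : Int))
        (some ((m + pend.length + 1 : Nat) : Int))).toList = pvPend [] line.toList := by
    rw [PySem.Str.toList_slice, PySem.Chars.slice_eq_listSlice, PySem.List.slice_natCast, hfull]
    have hys' : ys.length = m - pend.length := by omega
    conv_lhs => rw [show line.toList = ys ++ (pend ++ [c]) from by
      rw [← List.append_assoc, ← hys, ← hc]]
    rw [List.drop_left' hys', List.take_of_length_le (by simp; omega)]
  conv_rhs => rw [← h1]
  rw [String.ofList_toList]

-- the loop invariant of A's scan: after m < len steps the accumulated list is B's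
-- groups of the first m characters and count is the pending digit-run length
lemma pvStepA_fold (line : String) :
    ∀ m : Nat, m < line.toList.length →
      (List.map (fun k : Nat => (k : Int)) (List.range m)).foldl
          (pvStepA line (PySem.Str.len line)) (([], 0) : List String × Int)
        = ((pvFindGroups [] (line.toList.take m)).map String.ofList,
           ((pvPend [] (line.toList.take m)).length : Int)) := by
  intro m
  induction m with
  | zero => intro _; simp [pvFindGroups, pvPend]
  | succ m ih =>
    intro hm
    have hm' : m < line.toList.length := Nat.lt_of_succ_lt hm
    rw [List.range_succ, List.map_append, List.foldl_append, ih hm']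
    simp only [List.map_cons, List.map_nil, List.foldl_cons, List.foldl_nil]
    rw [pvTake_concat line m hm']
    simp only [pvStepA, pvGet_line line m hm', pvIsdigit_eq]
    by_cases hd : PySem.Chars.isdigit (line.toList[m]'hm')
    · have hbeq : (((m : Nat) : Int) == PySem.Str.len line - 1) = false := by
        rw [PySem.Str.len_eq]
        simp only [beq_eq_false_iff_ne, ne_eq]
        omega
      simp only [hd, not_true, if_false, if_true, hbeq, Bool.false_eq_true]
      rw [pvFindGroups_concat, if_pos hd, pvPend_concat, if_pos hd]
      simp
    · simp only [hd, not_false_iff, if_true, Bool.false_eq_true]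
      rw [pvSliceA line m (le_of_lt hm'), pvFindGroups_concat, if_neg hd,
        pvPend_concat, if_neg hd]
      simp

-- ===== VERDICT (by name: the statement is the Claim_ definition above) =====
theorem integer_list_spec : Claim_equal_integer_list := by
  intro line _
  unfold Spec_integer_list integer_list
  rcases hn : line.toList.length with _ | m
  · have hnil : line.toList = [] := List.length_eq_zero_iff.mp hn
    have hr : PySem.List.pyRange 0 (PySem.Str.len line) = [] := by
      rw [PySem.Str.len_eq, hn, PySem.List.pyRange_zero_natCast]
      simp
    rw [hr]
    simp [integer_list_alt, hnil, pvFindGroups, PySem.List.pyGet?, PySem.List.pyIdx?]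
  · have hm' : m < line.toList.length := by omega
    have hc : line.toList = line.toList.take m ++ [line.toList[m]'hm'] := by
      conv_lhs => rw [← List.take_of_length_le (by omega : line.toList.length ≤ m + 1),
        pvTake_concat line m hm']
    have hr : PySem.List.pyRange 0 (PySem.Str.len line)
        = List.map (fun k : Nat => (k : Int)) (List.range (m + 1)) := by
      rw [PySem.Str.len_eq, hn, PySem.List.pyRange_zero_natCast]
    rw [hr, List.range_succ, List.map_append, List.foldl_append, pvStepA_fold line m hm']
    simp only [List.map_cons, List.map_nil, List.foldl_cons, List.foldl_nil]
    simp only [pvStepA, pvGet_line line m hm', pvIsdigit_eq]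
    have hlast : PySem.List.pyGet? line.toList (-1) = some (line.toList[m]'hm') := by
      simp only [PySem.List.pyGet?, PySem.List.pyIdx?, hn]
      norm_num
    by_cases hd : PySem.Chars.isdigit (line.toList[m]'hm')
    · have hbeq : (((m : Nat) : Int) == PySem.Str.len line - 1) = true := by
        rw [PySem.Str.len_eq, hn]
        simp only [beq_iff_eq]
        omega
      have hgr : pvFindGroups [] line.toList = pvFindGroups [] (line.toList.take m) := by
        conv_lhs => rw [hc]
        rw [pvFindGroups_concat, if_pos hd]
      have hds : pvDigitSuffix line.toList = pvPend [] line.toList := by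
        have h2 := pvPend_eq_suffix line.toList [] (by simp)
        simp only [List.nil_append] at h2
        exact h2.symm
      simp only [hd, not_true, if_false, if_true, hbeq]
      rw [pvSliceB line m (line.toList[m]'hm') hn hc hd]
      simp only [integer_list_alt, hlast, hd, if_pos]
      rw [hgr, hds]
    · have hgr : pvFindGroups [] line.toList
          = pvFindGroups [] (line.toList.take m) ++ [pvPend [] (line.toList.take m)] := by
        conv_lhs => rw [hc]
        rw [pvFindGroups_concat, if_neg hd]
      simp only [hd]
      rw [pvSliceA line m (le_of_lt hm')]
      simp only [integer_list_alt, hlast, hd, Bool.false_eq_true, if_false]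
      rw [hgr]
      simp
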